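-- pv_equiv track=rewrite | github.com/Ko-udon/Algorithm | 프로그래머스/Lv.0/181890. 왼쪽 오른쪽/왼쪽 오른쪽.py | solution
-- ===== SOURCE A (Python) =====
-- def solution(str_list):
--     if "l" not in str_list and "r" not in str_list:
--         return []
--     for s in str_list:
--         if s == "r":
--             n = str_list.index(s)
--             return str_list[n+1:]
--         elif s == "l":
--             n = str_list.index(s)
--             return str_list[:n]
-- ===== SOURCE B (Python) =====
-- def solution(str_list):
--     n = len(str_list)
--     li = str_list.index("l") if "l" in str_list else n
--     ri = str_list.index("r") if "r" in str_list else n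
--     if li == n and ri == n:
--         return []
--     if ri < li:
--         return str_list[ri+1:]
--     return str_list[:li]
-- ===== Notes on version B (the rewrite author's own statement) =====
-- stated objective: alternative
-- what changed: Replaces A's scan-and-branch loop (walk the list, on the first 'r'/'l' call .index again and slice) with a compute-both-index-positions-then-compare shape: both positions are found once with a len() sentinel, and a single comparison picks the slice.
import Mathlib
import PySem

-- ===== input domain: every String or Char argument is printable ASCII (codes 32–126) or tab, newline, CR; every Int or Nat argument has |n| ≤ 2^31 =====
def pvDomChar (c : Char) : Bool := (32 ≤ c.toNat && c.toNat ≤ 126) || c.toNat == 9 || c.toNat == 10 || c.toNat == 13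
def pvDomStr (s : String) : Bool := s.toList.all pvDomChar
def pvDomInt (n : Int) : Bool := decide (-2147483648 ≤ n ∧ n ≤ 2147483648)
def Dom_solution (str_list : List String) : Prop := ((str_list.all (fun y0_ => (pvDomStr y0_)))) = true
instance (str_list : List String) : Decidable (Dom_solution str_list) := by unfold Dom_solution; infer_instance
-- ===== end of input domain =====

-- B computes both marker positions once (with a len() sentinel) and compares them, instead of A's
-- scan-and-branch loop; equivalence of the two shapes is proved below.

-- ===== PORT A =====
-- the 'for s in str_list' loop of A; the [] in the nil case is unreachable under A's guard
def solutionLoop (str_list : List String) : List String → List String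
  | [] => []
  | s :: rest =>
    if s = "r" then
      match PySem.List.index? str_list s with
      | some n => PySem.List.slice str_list (some ((n : Int) + 1)) none
      | none => []
    else if s = "l" then
      match PySem.List.index? str_list s with
      | some n => PySem.List.slice str_list none (some (n : Int))
      | none => []
    else solutionLoop str_list rest

def solution (str_list : List String) : List String :=
  if ¬ str_list.contains "l" ∧ ¬ str_list.contains "r" then []
  else solutionLoop str_list str_list

-- ===== PORT B =====
def solution_alt (str_list : List String) : List String :=
  let n := str_list.length
  let li := (PySem.List.index? str_list "l").getD n
  let ri := (PySem.List.index? str_list "r").getD n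
  if li = n ∧ ri = n then []
  else if ri < li then PySem.List.slice str_list (some ((ri : Int) + 1)) none
  else PySem.List.slice str_list none (some (li : Int))

-- ===== PRECONDITION & SPEC =====
def Spec_solution (str_list : List String) (out : List String) : Prop := out = solution_alt str_list
instance (str_list : List String) (out : List String) : Decidable (Spec_solution str_list out) := by unfold Spec_solution; infer_instance

-- ===== CLAIM (what is proved, stated in full; the proofs are below) =====
def Claim_equal_solution : Prop := ∀ (str_list : List String), Dom_solution str_list → Spec_solution str_list (solution str_list)

-- ===== LEMMAS AND PROOFS =====

-- if the first marker the loop meets is "r", the loop returns A's r-slice of the full list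
lemma loop_r_first (full : List String) :
    ∀ (pre post : List String), "l" ∉ pre → "r" ∉ pre →
      solutionLoop full (pre ++ "r" :: post) =
        (match PySem.List.index? full "r" with
         | some n => PySem.List.slice full (some ((n : Int) + 1)) none
         | none => []) := by
  intro pre
  induction pre with
  | nil => intro post _ _; simp [solutionLoop]
  | cons p pre ih =>
    intro post hl hr
    have hpr : p ≠ "r" := fun h => hr (by simp [h])
    have hpl : p ≠ "l" := fun h => hl (by simp [h])
    simp only [List.cons_append, solutionLoop, if_neg hpr, if_neg hpl]
    exact ih post (fun h => hl (List.mem_cons_of_mem _ h)) (fun h => hr (List.mem_cons_of_mem _ h))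

-- if the first marker the loop meets is "l", the loop returns A's l-slice of the full list
lemma loop_l_first (full : List String) :
    ∀ (pre post : List String), "l" ∉ pre → "r" ∉ pre →
      solutionLoop full (pre ++ "l" :: post) =
        (match PySem.List.index? full "l" with
         | some n => PySem.List.slice full none (some (n : Int))
         | none => []) := by
  intro pre
  induction pre with
  | nil =>
    intro post _ _
    simp [solutionLoop, (by decide : ("l" : String) ≠ "r")]
  | cons p pre ih =>
    intro post hl hr
    have hpr : p ≠ "r" := fun h => hr (by simp [h])
    have hpl : p ≠ "l" := fun h => hl (by simp [h])
    simp only [List.cons_append, solutionLoop, if_neg hpr, if_neg hpl]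
    exact ih post (fun h => hl (List.mem_cons_of_mem _ h)) (fun h => hr (List.mem_cons_of_mem _ h))

lemma index?_lt_length {xs : List String} {v : String} {k : Nat}
    (h : PySem.List.index? xs v = some k) : k < xs.length := by
  obtain ⟨hk, -, -⟩ := PySem.List.getElem_of_index?_eq_some h
  exact hk

-- ===== VERDICT (by name: the statement is the Claim_ definition above) =====
theorem solution_spec : Claim_equal_solution := by
  intro str_list _
  unfold Spec_solution solution solution_alt
  simp only []
  rcases hL : PySem.List.index? str_list "l" with _ | j
  · rcases hR : PySem.List.index? str_list "r" with _ | k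
    · -- no marker at all: both return []
      have hl : "l" ∉ str_list := (PySem.List.index?_eq_none_iff _ _).mp hL
      have hr : "r" ∉ str_list := (PySem.List.index?_eq_none_iff _ _).mp hR
      rw [if_pos ⟨by simpa using hl, by simpa using hr⟩]
      simp
    · -- only "r" present
      have hl : "l" ∉ str_list := (PySem.List.index?_eq_none_iff _ _).mp hL
      have hrmem : "r" ∈ str_list := (PySem.List.index?_isSome_iff _ _).mp (by rw [hR]; rfl)
      have hk := index?_lt_length hR
      rw [if_neg (by simp [hrmem])]
      obtain ⟨pre, post, hdec, hlen, hrpre⟩ := (PySem.List.index?_eq_some_iff _ _ _).mp hR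
      have hlpre : "l" ∉ pre := fun h => hl (hdec ▸ List.mem_append_left _ h)
      have hA := loop_r_first str_list pre post hlpre hrpre
      rw [hR] at hA
      rw [← hdec] at hA
      rw [hA]
      simp only [Option.getD_some, Option.getD_none]
      rw [if_neg (by omega), if_pos (by omega)]
  · rcases hR : PySem.List.index? str_list "r" with _ | k
    · -- only "l" present
      have hr : "r" ∉ str_list := (PySem.List.index?_eq_none_iff _ _).mp hR
      have hlmem : "l" ∈ str_list := (PySem.List.index?_isSome_iff _ _).mp (by rw [hL]; rfl)
      have hj := index?_lt_length hL
      rw [if_neg (by simp [hlmem])]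
      obtain ⟨pre, post, hdec, hlen, hlpre⟩ := (PySem.List.index?_eq_some_iff _ _ _).mp hL
      have hrpre : "r" ∉ pre := fun h => hr (hdec ▸ List.mem_append_left _ h)
      have hA := loop_l_first str_list pre post hlpre hrpre
      rw [hL] at hA
      rw [← hdec] at hA
      rw [hA]
      simp only [Option.getD_some, Option.getD_none]
      rw [if_neg (by omega), if_neg (by omega)]
    · -- both present: the smaller index wins
      have hlmem : "l" ∈ str_list := (PySem.List.index?_isSome_iff _ _).mp (by rw [hL]; rfl)
      have hj := index?_lt_length hL
      have hk := index?_lt_length hR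
      rw [if_neg (by simp [hlmem])]
      simp only [Option.getD_some]
      obtain ⟨hj', hgetl, -⟩ := PySem.List.getElem_of_index?_eq_some hL
      obtain ⟨hk', hgetr, -⟩ := PySem.List.getElem_of_index?_eq_some hR
      have hne : j ≠ k := by
        intro h; subst h
        exact absurd (hgetl.symm.trans hgetr) (by decide)
      rcases Nat.lt_or_ge k j with hkj | hjk
      · -- "r" comes first
        obtain ⟨pre, post, hdec, hlen, hrpre⟩ := (PySem.List.index?_eq_some_iff _ _ _).mp hR
        have hlpre : "l" ∉ pre := by
          intro h
          have h1 : PySem.List.index? str_list "l" = PySem.List.index? pre "l" := by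
            rw [hdec]; exact PySem.List.index?_append_of_mem _ h
          rcases hi : PySem.List.index? pre "l" with _ | i
          · exact (PySem.List.index?_eq_none_iff _ _).mp hi h
          · have hilt := index?_lt_length hi
            have h2 : (some j : Option Nat) = some i := by rw [← hL, h1, hi]
            have : j = i := by injection h2
            omega
        have hA := loop_r_first str_list pre post hlpre hrpre
        rw [hR] at hA
        rw [← hdec] at hA
        rw [hA, if_neg (by omega), if_pos (by omega)]
      · -- "l" comes first
        have hjk' : j < k := by omega
        obtain ⟨pre, post, hdec, hlen, hlpre⟩ := (PySem.List.index?_eq_some_iff _ _ _).mp hL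
        have hrpre : "r" ∉ pre := by
          intro h
          have h1 : PySem.List.index? str_list "r" = PySem.List.index? pre "r" := by
            rw [hdec]; exact PySem.List.index?_append_of_mem _ h
          rcases hi : PySem.List.index? pre "r" with _ | i
          · exact (PySem.List.index?_eq_none_iff _ _).mp hi h
          · have hilt := index?_lt_length hi
            have h2 : (some k : Option Nat) = some i := by rw [← hR, h1, hi]
            have : k = i := by injection h2
            omega
        have hA := loop_l_first str_list pre post hlpre hrpre
        rw [hL] at hA
        rw [← hdec] at hA
        rw [hA, if_neg (by omega), if_neg (by omega)]
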